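-- pv_equiv track=rewrite | github.com/rawlins/lambda-notebook | lamb/parsing.py | struc_dirstrip
-- ===== SOURCE A (Python) =====
-- def struc_dirstrip(struc, left=True):
--     # this guarantees at least len 1 on the return
--     if not struc:
--         return [""]
--
--     if left:
--         target = 0
--         remainder = slice(1, None)
--         f = lambda s: s.lstrip()
--         combine = lambda s,struc: [s] + struc
--     else:
--         target = -1
--         remainder = slice(None, -1)
--         f = lambda s: s.rstrip()
--         combine = lambda s,struc: struc + [s]
--
--     # no recursing
--     if not isinstance(struc[target], str):
--         return struc
--     stripped = f(struc[target])
--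
--     if len(stripped) == 0:
--         return struc_dirstrip(struc[remainder], left=left)
--     else:
--         return combine(stripped, struc[remainder])
-- ===== SOURCE B (Python) =====
-- def struc_dirstrip(struc, left=True):
--     if left:
--         i = 0
--         while i < len(struc):
--             if not isinstance(struc[i], str):
--                 return struc[i:]
--             s = struc[i].lstrip()
--             if s:
--                 return [s] + struc[i+1:]
--             i += 1
--         return [""]
--     else:
--         j = len(struc)
--         while j > 0:
--             if not isinstance(struc[j-1], str):
--                 return struc[:j]
--             s = struc[j-1].rstrip()
--             if s:
--                 return struc[:j-1] + [s]
--             j -= 1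
--         return [""]
-- ===== Notes on version B (the rewrite author's own statement) =====
-- stated objective: simpler
-- what changed: Replaces A's recursion (which copies a slice of the list at every recursive step) by a single iterative index scan that takes one slice at the end.
import Mathlib
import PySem

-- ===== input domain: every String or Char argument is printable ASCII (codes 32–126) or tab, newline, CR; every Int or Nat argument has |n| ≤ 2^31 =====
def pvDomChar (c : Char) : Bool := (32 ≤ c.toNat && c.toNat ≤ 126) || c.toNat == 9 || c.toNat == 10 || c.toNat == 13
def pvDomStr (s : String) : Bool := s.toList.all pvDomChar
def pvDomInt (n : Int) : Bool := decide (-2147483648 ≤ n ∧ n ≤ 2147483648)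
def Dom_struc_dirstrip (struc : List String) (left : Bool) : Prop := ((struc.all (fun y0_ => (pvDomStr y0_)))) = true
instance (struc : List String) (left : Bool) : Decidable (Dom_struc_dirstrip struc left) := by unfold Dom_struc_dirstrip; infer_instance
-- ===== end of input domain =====

-- B replaces A's slice-copying recursion with a single iterative index scan; objective: simpler.
-- (The Python `isinstance(_, str)` checks in both programs are vacuous over List String and vanish in the ports.)

-- ===== PORT A =====
-- A, literally: empty guard, then strip the target element; if it strips to empty,
-- recurse on the remainder slice, else recombine the stripped element with the remainder.
def struc_dirstrip (struc : List String) (left : Bool) : List String :=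
  if struc = [] then [""]
  else if left then
    let stripped := PySem.Str.lstrip struc.headI
    if PySem.Str.len stripped = 0 then struc_dirstrip struc.tail left
    else stripped :: struc.tail
  else
    let stripped := PySem.Str.rstrip struc.getLastI
    if PySem.Str.len stripped = 0 then struc_dirstrip struc.dropLast left
    else struc.dropLast ++ [stripped]
termination_by struc.length
decreasing_by
  · cases struc with
    | nil => simp_all
    | cons a l => simp
  · cases struc with
    | nil => simp_all
    | cons a l => simp

-- ===== PORT B =====
-- B, literally: the left-direction while-loop over an increasing index i.
def pvGoLeft (struc : List String) (i : Nat) : List String :=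
  if h : i < struc.length then
    let s := PySem.Str.lstrip struc[i]
    if PySem.Str.len s = 0 then pvGoLeft struc (i + 1)
    else s :: struc.drop (i + 1)
  else [""]
termination_by struc.length - i

-- B, literally: the right-direction while-loop; k is Python's j (condition j > 0, index j-1).
def pvGoRight (struc : List String) : Nat → List String
  | 0 => [""]
  | k + 1 =>
    let s := PySem.Str.rstrip (struc.getD k "")
    if PySem.Str.len s = 0 then pvGoRight struc k
    else struc.take k ++ [s]

def struc_dirstrip_alt (struc : List String) (left : Bool) : List String :=
  if left then pvGoLeft struc 0 else pvGoRight struc struc.length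

-- ===== PRECONDITION & SPEC =====
def Spec_struc_dirstrip (struc : List String) (left : Bool) (out : List String) : Prop := out = struc_dirstrip_alt struc left
instance (struc : List String) (left : Bool) (out : List String) : Decidable (Spec_struc_dirstrip struc left out) := by unfold Spec_struc_dirstrip; infer_instance

-- ===== CLAIM (what is proved, stated in full; the proofs are below) =====
def Claim_equal_struc_dirstrip : Prop := ∀ (struc : List String) (left : Bool), Dom_struc_dirstrip struc left → Spec_struc_dirstrip struc left (struc_dirstrip struc left)

-- ===== LEMMAS AND PROOFS =====

lemma A_cons_left (a : String) (l : List String) :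
    struc_dirstrip (a :: l) true =
      if PySem.Str.len (PySem.Str.lstrip a) = 0 then struc_dirstrip l true
      else PySem.Str.lstrip a :: l := by
  rw [struc_dirstrip]; simp

lemma A_concat_right (a : String) (l : List String) :
    struc_dirstrip (l ++ [a]) false =
      if PySem.Str.len (PySem.Str.rstrip a) = 0 then struc_dirstrip l false
      else l ++ [PySem.Str.rstrip a] := by
  rw [struc_dirstrip]
  simp [List.getLastI_eq_getLast?_getD]

lemma goLeft_eq (n : Nat) : ∀ (struc : List String) (i : Nat), struc.length - i = n →
    pvGoLeft struc i = struc_dirstrip (struc.drop i) true := by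
  induction n with
  | zero =>
    intro struc i h
    have hge : struc.length ≤ i := by omega
    rw [pvGoLeft, struc_dirstrip]
    simp [List.drop_eq_nil_of_le hge, Nat.not_lt.mpr hge]
  | succ n ih =>
    intro struc i h
    have hlt : i < struc.length := by omega
    have hdrop : struc.drop i = struc[i] :: struc.drop (i + 1) :=
      List.drop_eq_getElem_cons hlt
    rw [pvGoLeft, dif_pos hlt, hdrop, A_cons_left]
    by_cases hz : PySem.Str.len (PySem.Str.lstrip struc[i]) = 0
    · rw [if_pos hz, if_pos hz]
      exact ih struc (i + 1) (by omega)
    · rw [if_neg hz, if_neg hz]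

lemma goRight_eq : ∀ (k : Nat) (struc : List String), k ≤ struc.length →
    pvGoRight struc k = struc_dirstrip (struc.take k) false := by
  intro k
  induction k with
  | zero => intro struc _; rw [pvGoRight, struc_dirstrip]; simp
  | succ k ih =>
    intro struc hk
    have hlt : k < struc.length := by omega
    have htake : struc.take (k + 1) = struc.take k ++ [struc[k]] := by
      rw [List.take_add_one]; simp [List.getElem?_eq_getElem hlt]
    rw [pvGoRight, List.getD_eq_getElem struc "" hlt, htake, A_concat_right]
    by_cases hz : PySem.Str.len (PySem.Str.rstrip struc[k]) = 0
    · rw [if_pos hz, if_pos hz]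
      exact ih struc (by omega)
    · rw [if_neg hz, if_neg hz]

-- ===== VERDICT (by name: the statement is the Claim_ definition above) =====
theorem struc_dirstrip_spec : Claim_equal_struc_dirstrip := by
  intro struc left _
  unfold Spec_struc_dirstrip struc_dirstrip_alt
  cases left
  · rw [if_neg (by simp), goRight_eq struc.length struc le_rfl, List.take_length]
  · rw [if_pos rfl, goLeft_eq (struc.length - 0) struc 0 rfl, List.drop_zero]
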